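-- pv_equiv track=rewrite | github.com/JoeyFitzpatrick/fairychess | server/board/BoardBuilders.py | black_match_white
-- ===== SOURCE A (Python) =====
-- from typing import List
--
-- def is_empty(row: List[int]):
--     return all(piece == 0 for piece in row)
--
-- def flip_row_color(row):
--     row = [piece * -1 for piece in row]
--     return row
--
-- def black_match_white(board):
--     first = 0
--     last = len(board) - 1
--     while not is_empty(board[first]) and first < last:
--         board[last] = flip_row_color(board[first])
--         first += 1
--         last -= 1
--     return board
-- ===== SOURCE B (Python) =====
-- def black_match_white(board):
--     n = len(board)
--     # pass 1: count how many top rows get mirrored (stops at an empty row or the middle)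
--     k = 0
--     while not all(p == 0 for p in board[k]) and k < n - 1 - k:
--         k += 1
--     # pass 2: write the flipped copies to the bottom
--     for i in range(k):
--         board[n - 1 - i] = [-p for p in board[i]]
--     return board
-- ===== Notes on version B (the rewrite author's own statement) =====
-- stated objective: alternative
-- what changed: Replaces the interleaved two-pointer loop (test row, write mirror, move both pointers) by two separately-shaped passes: a counting scan that finds how many rows get mirrored, then a range loop that writes the flipped bottom rows.
import Mathlib
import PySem

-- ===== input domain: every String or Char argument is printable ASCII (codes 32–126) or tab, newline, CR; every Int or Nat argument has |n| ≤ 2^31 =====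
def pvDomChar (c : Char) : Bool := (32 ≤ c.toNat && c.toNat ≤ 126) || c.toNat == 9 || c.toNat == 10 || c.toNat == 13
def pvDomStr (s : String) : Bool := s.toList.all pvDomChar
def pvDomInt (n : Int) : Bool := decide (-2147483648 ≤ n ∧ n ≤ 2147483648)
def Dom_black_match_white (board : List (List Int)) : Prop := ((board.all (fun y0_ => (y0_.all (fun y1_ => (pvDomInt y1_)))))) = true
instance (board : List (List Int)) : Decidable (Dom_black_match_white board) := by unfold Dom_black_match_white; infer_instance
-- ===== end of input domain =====

-- B mirrors the non-empty top rows to the bottom in two separate passes (count, then write)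
-- instead of A's single interleaved two-pointer loop; both Pythons mutate the board in place
-- and return it — the equivalence proved here is about the returned value.

-- ===== PORT A =====
-- is_empty(row) = all(piece == 0 for piece in row)
def pvIsEmpty (row : List Int) : Bool := row.all (fun piece => piece == 0)
-- flip_row_color(row) = [piece * -1 for piece in row]
def pvFlipA (row : List Int) : List Int := row.map (fun piece => piece * -1)

-- the while loop of A; board[first] via pyGet? (none = IndexError, excluded by Pre_);
-- board[last] = … via pySetD (last is non-negative and in range at every call site)
def pvALoop (b : List (List Int)) (first last : Int) : List (List Int) :=
  match PySem.List.pyGet? b first with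
  | none => b   -- IndexError in Python; unreachable under Pre_
  | some row =>
    if ¬ pvIsEmpty row ∧ first < last then
      pvALoop (PySem.List.pySetD b last (pvFlipA row)) (first + 1) (last - 1)
    else b
termination_by (last - first).toNat
decreasing_by omega

def black_match_white (board : List (List Int)) : List (List Int) :=
  pvALoop board 0 ((board.length : Int) - 1)

-- ===== PORT B =====
-- pass 1 of B: count the rows to mirror (board[k] via pyGet?; none = IndexError, excluded by Pre_)
def pvCount (b : List (List Int)) (n : Int) (k : Int) : Int :=
  match PySem.List.pyGet? b k with
  | none => k   -- IndexError in Python; unreachable under Pre_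
  | some row =>
    if ¬ (row.all (fun p => p == 0)) ∧ k < n - 1 - k then
      pvCount b n (k + 1)
    else k
termination_by (n - 2*k).toNat
decreasing_by omega

-- pass 2 of B: one write of the for-body (board[i] via pyGetD: i is in range for every i < k)
def pvWrite (n : Int) (acc : List (List Int)) (i : Int) : List (List Int) :=
  PySem.List.pySetD acc (n - 1 - i) ((PySem.List.pyGetD acc i []).map (fun p => -p))

def black_match_white_alt (board : List (List Int)) : List (List Int) :=
  let n : Int := board.length
  let k : Int := pvCount board n 0
  (PySem.List.pyRange 0 k 1).foldl (pvWrite n) board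

-- ===== PRECONDITION & SPEC =====
-- Pre_ excludes the empty board, on which Python A raises IndexError at board[0].
def Pre_black_match_white (board : List (List Int)) : Prop := board ≠ []
instance (board : List (List Int)) : Decidable (Pre_black_match_white board) := by unfold Pre_black_match_white; infer_instance
def pvWitness_black_match_white : List (List Int) := [[1, 2], [0, 0], [0, 0]]

def Spec_black_match_white (board : List (List Int)) (out : List (List Int)) : Prop := out = black_match_white_alt board
instance (board : List (List Int)) (out : List (List Int)) : Decidable (Spec_black_match_white board out) := by unfold Spec_black_match_white; infer_instance

-- ===== CLAIM (what is proved, stated in full; the proofs are below) =====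
def Claim_equal_black_match_white : Prop := ∀ (board : List (List Int)), Dom_black_match_white board → Pre_black_match_white board → Spec_black_match_white board (black_match_white board)

-- ===== LEMMAS AND PROOFS =====

-- the counting pass never moves backwards
theorem pvCount_ge (b : List (List Int)) (n k : Int) : k ≤ pvCount b n k := by
  suffices H : ∀ (fuel : Nat) (k : Int), (n - 2*k).toNat ≤ fuel → k ≤ pvCount b n k from
    H (n - 2*k).toNat k le_rfl
  intro fuel
  induction fuel with
  | zero =>
    intro k hfuel
    rw [pvCount]
    match h : PySem.List.pyGet? b k with
    | none => simp only [h]; omega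
    | some row =>
      simp only [h]
      rw [if_neg (by rintro ⟨-, h2⟩; omega)]
  | succ fuel ih =>
    intro k hfuel
    rw [pvCount]
    match h : PySem.List.pyGet? b k with
    | none => simp only [h]; omega
    | some row =>
      simp only [h]
      by_cases hc : ¬ (row.all (fun p => p == 0)) = true ∧ k < n - 1 - k
      · have h2 := hc.2
        rw [if_pos hc]
        have := ih (k + 1) (by omega)
        omega
      · rw [if_neg hc]

-- the counting pass ignores a write at index m with n - 1 ≤ m + k (it never reads there
-- while the loop condition can still hold)
theorem pvCount_set (m : Nat) (r : List Int) (b : List (List Int)) (n k : Int)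
    (hk0 : 0 ≤ k) (hm0 : n - 1 ≤ (m : Int) + k) :
    pvCount (b.set m r) n k = pvCount b n k := by
  suffices H : ∀ (fuel : Nat) (k : Int), (n - 2*k).toNat ≤ fuel → 0 ≤ k → n - 1 ≤ (m : Int) + k →
      pvCount (b.set m r) n k = pvCount b n k from
    H (n - 2*k).toNat k le_rfl hk0 hm0
  intro fuel
  induction fuel with
  | zero =>
    intro k hfuel hk hm
    conv_lhs => rw [pvCount]
    conv_rhs => rw [pvCount]
    match h : PySem.List.pyGet? b k, h' : PySem.List.pyGet? (b.set m r) k with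
    | none, none => simp only [h, h']
    | none, some row' =>
      exfalso
      rw [PySem.List.pyGet?_eq_none_iff] at h
      rw [PySem.List.pyGet?_of_nonneg _ hk] at h'
      obtain ⟨hl, -⟩ := List.getElem?_eq_some_iff.mp h'
      simp [PySem.Raise.InRange] at h
      simp at hl
      omega
    | some row, none =>
      exfalso
      rw [PySem.List.pyGet?_eq_none_iff] at h'
      rw [PySem.List.pyGet?_of_nonneg _ hk] at h
      obtain ⟨hl, -⟩ := List.getElem?_eq_some_iff.mp h
      simp [PySem.Raise.InRange] at h'
      omega
    | some row, some row' =>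
      simp only [h, h']
      rw [if_neg (by rintro ⟨-, h2⟩; omega), if_neg (by rintro ⟨-, h2⟩; omega)]
  | succ fuel ih =>
    intro k hfuel hk hm
    conv_lhs => rw [pvCount]
    conv_rhs => rw [pvCount]
    match h : PySem.List.pyGet? b k with
    | none =>
      have h' : PySem.List.pyGet? (b.set m r) k = none := by
        rw [PySem.List.pyGet?_eq_none_iff] at h ⊢
        simpa [PySem.Raise.InRange] using h
      simp only [h, h']
    | some row =>
      by_cases hlt : k < n - 1 - k
      · -- the read index k differs from the written index m
        have h' : PySem.List.pyGet? (b.set m r) k = some row := by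
          rw [PySem.List.pyGet?_of_nonneg _ hk] at h ⊢
          rwa [List.getElem?_set_ne (by omega)]
        simp only [h, h']
        by_cases hc : ¬ (row.all (fun p => p == 0)) = true ∧ k < n - 1 - k
        · rw [if_pos hc, if_pos hc]
          exact ih (k + 1) (by omega) (by omega) (by omega)
        · rw [if_neg hc, if_neg hc]
      · -- condition false on both boards whatever the row reads
        match h' : PySem.List.pyGet? (b.set m r) k with
        | none =>
          simp only [h, h']
          rw [if_neg (by rintro ⟨-, h2⟩; omega)]
        | some row' =>
          simp only [h, h']
          rw [if_neg (by rintro ⟨-, h2⟩; omega), if_neg (by rintro ⟨-, h2⟩; omega)]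

-- main invariant: from state (b, first) with last = n - 1 - first, A's remaining loop
-- equals B's remaining writes, whose count is B's counting pass started at first
theorem pvMain (n : Int) (b : List (List Int)) (f : Int) (hb : (b.length : Int) = n) (hf : 0 ≤ f) :
    pvALoop b f (n - 1 - f) = (PySem.List.pyRange f (pvCount b n f) 1).foldl (pvWrite n) b := by
  induction hfuel : (n - f).toNat generalizing b f with
  | zero =>
    -- f ≥ n: board[f] is out of range, both sides stop at once
    have h : PySem.List.pyGet? b f = none := by
      rw [PySem.List.pyGet?_eq_none_iff]; simp [PySem.Raise.InRange]; omega
    rw [pvALoop, pvCount]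
    simp only [h]
    simp [PySem.List.pyRange_one_eq_nil (by omega : f ≤ f)]
  | succ fuel ih =>
    rw [pvALoop, pvCount]
    match h : PySem.List.pyGet? b f with
    | none => simp only [h]; simp [PySem.List.pyRange_one_eq_nil (by omega : f ≤ f)]
    | some row =>
      simp only [h]
      by_cases hc : ¬ pvIsEmpty row = true ∧ f < n - 1 - f
      · have hc' : ¬ (row.all (fun p => p == 0)) = true ∧ f < n - 1 - f := by
          simpa [pvIsEmpty] using hc
        rw [if_pos hc, if_pos hc']
        have hset : PySem.List.pySetD b (n - 1 - f) (pvFlipA row)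
            = b.set (n - 1 - f).toNat (pvFlipA row) :=
          PySem.List.pySetD_of_nonneg b _ (by omega)
        have hlen' : (((b.set (n - 1 - f).toNat (pvFlipA row)).length : Nat) : Int) = n := by
          simpa using hb
        have hcnt : pvCount (b.set (n - 1 - f).toNat (pvFlipA row)) n (f + 1)
            = pvCount b n (f + 1) :=
          pvCount_set _ _ b n (f + 1) (by omega)
            (by rw [Int.toNat_of_nonneg (by omega)]; omega)
        have hK : f + 1 ≤ pvCount b n (f + 1) := pvCount_ge b n (f + 1)
        have harg : n - 1 - f - 1 = n - 1 - (f + 1) := by ring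
        rw [hset, harg, ih _ (f + 1) hlen' (by omega) (by omega), hcnt,
            PySem.List.pyRange_one_cons (by omega : f < pvCount b n (f + 1))]
        simp only [List.foldl_cons]
        congr 1
        -- board[f] read by the write pass is still the original row
        have h2 := h
        rw [PySem.List.pyGet?_of_nonneg _ hf] at h2
        obtain ⟨hfnat, hfeq⟩ := List.getElem?_eq_some_iff.mp h2
        have hrow : PySem.List.pyGetD b f [] = row := by
          rw [PySem.List.pyGetD_eq_getElem b [] hf (by omega)]
          exact hfeq
        rw [pvWrite, hrow, PySem.List.pySetD_of_nonneg b _ (by omega)]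
        simp [pvFlipA]
      · have hc' : ¬ (¬ (row.all (fun p => p == 0)) = true ∧ f < n - 1 - f) := by
          simpa [pvIsEmpty] using hc
        rw [if_neg hc, if_neg hc']
        simp [PySem.List.pyRange_one_eq_nil (by omega : f ≤ f)]

-- ===== VERDICT (by name: the statement is the Claim_ definition above) =====
theorem black_match_white_spec : Claim_equal_black_match_white := by
  intro board _ _
  unfold Spec_black_match_white black_match_white black_match_white_alt
  have := pvMain (board.length : Int) board 0 rfl (by omega)
  simpa using this
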